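-- pv_equiv track=rewrite | github.com/Jagorrim/Repeater2 | addition.py | parse_hyperlinks
-- ===== SOURCE A (Python) =====
-- def parse_hyperlinks(post_text: str) -> str:
--     text_index = 0
--     new_text = ''
--     while text_index < len(post_text):
--         # Если текущий символ - "[", а после него есть и "]", а между ними есть "|", то
--         # пробуем вычленить оттуда ссылку и текст, который замещает её
--         if '[' == post_text[text_index] and ']' in post_text[text_index:] and \
--                 '|' in post_text[text_index: post_text[text_index:].find(']') + 1 + text_index]:
--             link_place = post_text[
--                          text_index: post_text[text_index:].find(']') + 1 + text_index
--                          ]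
--             link = link_place[1:link_place.find('|')]
--             # Если ссылка НЕ имеет при себе префикса в виде сетевого протокола и домена вк (а такое может быть),
--             # то добавляем их, чтобы ссылка была настоящей.
--             if not link.startswith('https://vk.com/'):
--                 link = 'https://vk.com/' + link
--             text = link_place[link_place.find('|') + 1: -1]
--
--             new_text += f'[{text}]({link})'  # создание гиперссылок, но уже дискордовских
--             text_index += len(link_place)
--         else:
--             new_text += post_text[text_index]
--             text_index += 1
--     return new_text
-- ===== SOURCE B (Python) =====
-- def parse_hyperlinks(post_text: str) -> str:
--     # Jump between '[' occurrences with str.find and emit whole chunks,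
--     # instead of A's character-by-character scan with repeated slicing.
--     out = []
--     s = post_text
--     while True:
--         j = s.find('[')
--         if j == -1:
--             out.append(s)
--             return ''.join(out)
--         out.append(s[:j])
--         rest = s[j + 1:]
--         k = rest.find(']')
--         body = rest[:k] if k != -1 else ''
--         if k != -1 and '|' in body:
--             link, text = body.split('|', 1)
--             if not link.startswith('https://vk.com/'):
--                 link = 'https://vk.com/' + link
--             out.append('[' + text + '](' + link + ')')
--             s = rest[k + 1:]
--         else:
--             out.append('[')
--             s = rest
-- ===== Notes on version B (the rewrite author's own statement) =====
-- stated objective: faster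
-- what changed: Replaced A's character-by-character while-loop, which re-slices the whole remaining string and re-runs membership/find on it at every single character, by a chunk-jumping loop: str.find locates the next opening bracket, the literal text before it is emitted as one chunk, and the bracket is parsed once from the suffix after it.
import Mathlib
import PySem

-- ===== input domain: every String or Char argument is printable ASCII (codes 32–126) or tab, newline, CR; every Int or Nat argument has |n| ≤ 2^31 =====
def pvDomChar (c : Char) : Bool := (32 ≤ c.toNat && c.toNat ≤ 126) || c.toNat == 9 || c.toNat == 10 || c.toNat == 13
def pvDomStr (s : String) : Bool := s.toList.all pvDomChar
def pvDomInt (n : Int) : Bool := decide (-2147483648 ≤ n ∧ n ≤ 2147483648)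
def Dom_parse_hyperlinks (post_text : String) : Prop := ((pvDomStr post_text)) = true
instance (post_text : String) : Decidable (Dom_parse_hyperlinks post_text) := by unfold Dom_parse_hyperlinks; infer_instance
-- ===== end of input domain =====

-- B replaces A's character-by-character scan (which re-slices and re-searches the remaining string at every character) by a chunk-jumping loop that jumps to the next opening bracket with str.find; equal return value on every input.

-- ===== PORT A =====
-- the constant 'https://vk.com/' used by both programs
def pvVK : List Char := "https://vk.com/".toList

-- A's while-loop; the position text_index is represented by the suffix rem = post_text[text_index:],
-- new_text by acc; every test/slice is the one A performs on that suffix.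
def pvAGo (rem : List Char) (acc : List Char) : List Char :=
  match rem with
  | [] => acc
  | c :: rest =>
    if hc : c = '[' ∧ PySem.Chars.isIn [']'] (c :: rest) = true ∧
        PySem.Chars.isIn ['|'] (PySem.List.slice (c :: rest) none (some (PySem.Chars.find (c :: rest) [']'] + 1))) = true then
      let link_place := PySem.List.slice (c :: rest) none (some (PySem.Chars.find (c :: rest) [']'] + 1))
      let pos := PySem.Chars.find link_place ['|']
      let link := PySem.List.slice link_place (some 1) (some pos)
      let link2 := if PySem.Chars.startswith link pvVK then link else pvVK ++ link
      let text := PySem.List.slice link_place (some (pos + 1)) (some (-1))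
      pvAGo ((c :: rest).drop link_place.length) (acc ++ ('[' :: text ++ [']', '('] ++ link2 ++ [')']))
    else
      pvAGo rest (acc ++ [c])
  termination_by rem.length
  decreasing_by
  · have h0 : 0 ≤ PySem.Chars.find (c :: rest) [']'] := by
      rw [PySem.Chars.find_nonneg_iff]
      exact (PySem.Chars.isIn_iff_infix _ _).mp hc.2.1
    have : PySem.List.slice (c :: rest) none (some (PySem.Chars.find (c :: rest) [']'] + 1))
        = List.take (PySem.Chars.find (c :: rest) [']'] + 1).toNat (c :: rest) :=
      PySem.List.slice_to _ (by omega)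
    simp only [this, List.length_drop, List.length_take, List.length_cons]
    omega
  · simp

def parse_hyperlinks (post_text : String) : String :=
  String.ofList (pvAGo post_text.toList [])

-- ===== PORT B =====
-- B's while-loop; s is the still-unprocessed suffix, acc the joined output chunks.
def pvBGo (s : List Char) (acc : List Char) : List Char :=
  let j := PySem.Chars.find s ['[']
  if hj : j = -1 then acc ++ s
  else
    let pre := PySem.List.slice s none (some j)
    let rest := PySem.List.slice s (some (j + 1)) none
    let k := PySem.Chars.find rest [']']
    let body := if k = -1 then [] else PySem.List.slice rest none (some k)
    if hcond : k ≠ -1 ∧ PySem.Chars.isIn ['|'] body = true then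
      let p := PySem.Chars.find body ['|']
      let link := PySem.List.slice body none (some p)
      let text := PySem.List.slice body (some (p + 1)) none
      let link2 := if PySem.Chars.startswith link pvVK then link else pvVK ++ link
      pvBGo (PySem.List.slice rest (some (k + 1)) none) (acc ++ pre ++ ('[' :: text ++ [']', '('] ++ link2 ++ [')']))
    else
      pvBGo rest (acc ++ pre ++ ['['])
  termination_by s.length
  decreasing_by
  all_goals
    have hj0 : 0 ≤ PySem.Chars.find s ['['] := by
      rw [PySem.Chars.find_nonneg_iff]
      by_contra hinf
      exact hj ((PySem.Chars.find_eq_neg_one_iff _ _).mpr hinf)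
  all_goals
    have hmem : '[' ∈ s := (List.singleton_infix_iff _ _).mp
      ((PySem.Chars.find_nonneg_iff _ _).mp hj0)
  all_goals
    have hs0 : 0 < s.length := List.length_pos_of_mem hmem
  all_goals
    have hrest : PySem.List.slice s (some (PySem.Chars.find s ['['] + 1)) none
        = List.drop (PySem.Chars.find s ['['] + 1).toNat s := PySem.List.slice_from _ (by omega)
  · have hk0 : 0 ≤ PySem.Chars.find (PySem.List.slice s (some (PySem.Chars.find s ['['] + 1)) none) [']'] := by
      rw [PySem.Chars.find_nonneg_iff]
      by_contra hinf
      exact hcond.1 ((PySem.Chars.find_eq_neg_one_iff _ _).mpr hinf)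
    rw [PySem.List.slice_from _ (by omega : (0:Int) ≤ PySem.Chars.find (PySem.List.slice s (some (PySem.Chars.find s ['['] + 1)) none) [']'] + 1)]
    simp only [hrest, List.length_drop]
    omega
  · simp only [hrest, List.length_drop]
    omega

def parse_hyperlinks_alt (post_text : String) : String :=
  String.ofList (pvBGo post_text.toList [])

-- ===== PRECONDITION & SPEC =====
def Spec_parse_hyperlinks (post_text : String) (out : String) : Prop := out = parse_hyperlinks_alt post_text
instance (post_text : String) (out : String) : Decidable (Spec_parse_hyperlinks post_text out) := by unfold Spec_parse_hyperlinks; infer_instance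

-- ===== CLAIM (what is proved, stated in full; the proofs are below) =====
def Claim_equal_parse_hyperlinks : Prop := ∀ (post_text : String), Dom_parse_hyperlinks post_text → Spec_parse_hyperlinks post_text (parse_hyperlinks post_text)

-- ===== LEMMAS AND PROOFS =====
theorem pvGoNeg (sub : List Char) (t : List Char) : ∀ k : Nat, PySem.Chars.find.go sub t k = -1 ∨ 0 ≤ PySem.Chars.find.go sub t k := by
  induction t with
  | nil => intro k; simp only [PySem.Chars.find.go]; split_ifs <;> simp
  | cons x xs ih =>
    intro k
    simp only [PySem.Chars.find.go]
    split_ifs with h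
    · right; positivity
    · exact ih (k+1)

theorem pvGoShift (sub : List Char) (t : List Char) : ∀ k : Nat, PySem.Chars.find.go sub t k = if PySem.Chars.find.go sub t 0 = -1 then -1 else PySem.Chars.find.go sub t 0 + k := by
  induction t with
  | nil => intro k; simp only [PySem.Chars.find.go]; split_ifs <;> push_cast <;> omega
  | cons x xs ih =>
    intro k
    simp only [PySem.Chars.find.go]
    rw [ih (0+1), ih (k+1)]
    rcases pvGoNeg sub xs 0 with h0 | h0 <;> split_ifs <;> push_cast <;> omega

theorem pvFindCons (x c : Char) (t : List Char) :
    PySem.Chars.find (x :: t) [c] = if x = c then 0 else (if PySem.Chars.find t [c] = -1 then -1 else PySem.Chars.find t [c] + 1) := by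
  show PySem.Chars.find.go [c] (x :: t) 0 = _
  simp only [PySem.Chars.find.go]
  rw [pvGoShift]
  have hp : ([c].isPrefixOf (x :: t)) = (x == c) := by
    simp [List.isPrefixOf, Bool.beq_comm]
  rw [hp]
  show _ = if x = c then 0 else (if PySem.Chars.find.go [c] t 0 = -1 then -1 else PySem.Chars.find.go [c] t 0 + 1)
  by_cases hxc : x = c <;> simp [hxc]

theorem pvFindDecomp (c : Char) (s : List Char) (h : PySem.Chars.find s [c] ≠ -1) :
    ∃ pre suf, s = pre ++ c :: suf ∧ c ∉ pre ∧ (pre.length : Int) = PySem.Chars.find s [c] := by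
  induction s with
  | nil => simp [PySem.Chars.find, PySem.Chars.find.go] at h
  | cons x t ih =>
    rw [pvFindCons] at h ⊢
    by_cases hxc : x = c
    · subst hxc; exact ⟨[], t, rfl, by simp, by simp⟩
    · simp only [hxc, if_false] at h ⊢
      by_cases hft : PySem.Chars.find t [c] = -1
      · simp [hft] at h
      · obtain ⟨pre, suf, hs, hnp, hl⟩ := ih hft
        refine ⟨x :: pre, suf, by rw [hs]; rfl, ?_, ?_⟩
        · intro hm
          rcases List.mem_cons.mp hm with h1 | h2
          · exact hxc h1.symm
          · exact hnp h2
        · rw [if_neg hft, ← hl]; push_cast [List.length_cons]; omega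

theorem pvFindAppend (c : Char) (pre suf : List Char) (h : c ∉ pre) :
    PySem.Chars.find (pre ++ c :: suf) [c] = pre.length := by
  induction pre with
  | nil => simp [pvFindCons]
  | cons x t ih =>
    have hxc : ¬ x = c := fun hh => h (hh ▸ List.mem_cons_self ..)
    have ht : c ∉ t := fun hm => h (List.mem_cons_of_mem _ hm)
    rw [List.cons_append, pvFindCons, if_neg hxc, ih ht, if_neg (by omega)]
    push_cast [List.length_cons]; omega

theorem pvIsInSingleton (c : Char) (s : List Char) : PySem.Chars.isIn [c] s = true ↔ c ∈ s := by
  rw [PySem.Chars.isIn_iff_infix, List.singleton_infix_iff]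

theorem pvTakeApp (l t : List Char) (x : Char) : (l ++ x :: t).take (l.length + 1) = l ++ [x] := by
  induction l with
  | nil => simp
  | cons y ys ih => simp [ih]

theorem pvDropApp (l t : List Char) (x : Char) : (l ++ x :: t).drop (l.length + 1) = t := by
  induction l with
  | nil => simp
  | cons y ys ih => simp [ih]

theorem pvA_skip (pre : List Char) (h : '[' ∉ pre) (t acc : List Char) :
    pvAGo (pre ++ t) acc = pvAGo t (acc ++ pre) := by
  induction pre generalizing acc with
  | nil => simp
  | cons c pre' ih =>
    have hc : ¬ c = '[' := fun hh => h (hh ▸ List.mem_cons_self ..)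
    rw [List.cons_append, pvAGo, dif_neg (fun hcc => hc hcc.1)]
    rw [ih (fun hm => h (List.mem_cons_of_mem _ hm))]
    simp

theorem pvA_noBracket (s : List Char) (h : '[' ∉ s) (acc : List Char) :
    pvAGo s acc = acc ++ s := by
  have := pvA_skip s h [] acc
  simp at this
  simpa [pvAGo] using this

theorem pvSliceNegOne (xs : List Char) (a : Nat) :
    PySem.List.slice xs (some (a : Int)) (some (-1)) = (xs.drop a).dropLast := by
  simp only [PySem.List.slice, PySem.List.clampIdx]
  split_ifs with h1 h2 h3 <;> try omega
  · -- -1 < 0 and len + -1 < 0 : xs = []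
    have hx : xs.length = 0 := by omega
    rw [List.eq_nil_of_length_eq_zero hx]
    simp
  · have ha : ((a:Int)).toNat = a := by omega
    rw [ha, List.dropLast_eq_take, List.length_drop]
    rcases Nat.le_total a xs.length with hle | hle
    · rw [Nat.min_eq_left hle]; congr 1; omega
    · rw [List.drop_eq_nil_of_le hle]
      simp [Nat.min_eq_right hle]

theorem pvMain (s acc : List Char) : pvAGo s acc = pvBGo s acc := by
  suffices H : ∀ n : Nat, ∀ s acc : List Char, s.length = n → pvAGo s acc = pvBGo s acc from
    H s.length s acc rfl
  clear s acc
  intro n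
  induction n using Nat.strong_induction_on with
  | _ n ih =>
  intro s acc hn
  by_cases hj : PySem.Chars.find s ['['] = -1
  · have hmem : '[' ∉ s := fun hm =>
      ((PySem.Chars.find_eq_neg_one_iff _ _).mp hj) ((List.singleton_infix_iff _ _).mpr hm)
    rw [pvA_noBracket s hmem, pvBGo, dif_pos hj]
  · obtain ⟨pre, rest, hs, hpre, hlen⟩ := pvFindDecomp '[' s hj
    subst hs
    rw [pvA_skip pre hpre]
    have hj0 : (0:Int) ≤ PySem.Chars.find (pre ++ '[' :: rest) ['['] := by rw [← hlen]; positivity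
    have hpreS : PySem.List.slice (pre ++ '[' :: rest) none (some (PySem.Chars.find (pre ++ '[' :: rest) ['['])) = pre := by
      rw [PySem.List.slice_to _ hj0, ← hlen, Int.toNat_natCast, List.take_left]
    have hrestS : PySem.List.slice (pre ++ '[' :: rest) (some (PySem.Chars.find (pre ++ '[' :: rest) ['['] + 1)) none = rest := by
      rw [PySem.List.slice_from _ (by omega), ← hlen]
      have h2 : ((pre.length : Int) + 1).toNat = pre.length + 1 := by omega
      rw [h2, pvDropApp]
    rw [pvBGo]
    simp only [dif_neg hj, hpreS, hrestS]
    have hnlt : rest.length < n := by simp at hn; omega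
    by_cases hk : PySem.Chars.find rest [']'] = -1
    · -- no ']' after the '[': both sides emit '[' and continue after it
      have hkm : ']' ∉ rest := fun hm =>
        ((PySem.Chars.find_eq_neg_one_iff _ _).mp hk) ((List.singleton_infix_iff _ _).mpr hm)
      rw [dif_neg (fun hcc => hcc.1 hk)]
      rw [pvAGo, dif_neg (fun hcc => by
        have := (pvIsInSingleton _ _).mp hcc.2.1
        rcases List.mem_cons.mp this with h1 | h2
        · exact absurd h1 (by decide)
        · exact hkm h2)]
      have := ih rest.length hnlt rest (acc ++ pre ++ ['[']) rfl
      simpa [List.append_assoc] using this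
    · obtain ⟨body, tail, hrest, hbody, hkl⟩ := pvFindDecomp ']' rest hk
      subst hrest
      -- B's body slice is `body`
      have hbodyS : PySem.List.slice (body ++ ']' :: tail) none (some (PySem.Chars.find (body ++ ']' :: tail) [']'])) = body := by
        rw [PySem.List.slice_to _ (by rw [← hkl]; positivity), ← hkl, Int.toNat_natCast, List.take_left]
      -- A's link_place slice is '[' :: body ++ [']']
      have hfr : PySem.Chars.find ('[' :: (body ++ ']' :: tail)) [']'] = (body.length : Int) + 1 := by
        rw [pvFindCons, if_neg (by decide), if_neg hk, ← hkl]
      have hseg : PySem.List.slice ('[' :: (body ++ ']' :: tail)) none (some (PySem.Chars.find ('[' :: (body ++ ']' :: tail)) [']'] + 1)) = '[' :: (body ++ [']']) := by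
        rw [hfr, PySem.List.slice_to _ (by positivity)]
        have h2 : ((body.length : Int) + 1 + 1).toNat = body.length + 1 + 1 := by omega
        rw [h2]
        show ('[' :: (body ++ ']' :: tail)).take (body.length + 1 + 1) = _
        have := pvTakeApp body tail ']'
        simp [List.take_succ_cons] at this ⊢
        exact this
      simp only [if_neg hk, hbodyS]
      by_cases hp : ('|') ∈ body
      · -- a real hyperlink
        have hq : PySem.Chars.find body ['|'] ≠ -1 := by
          rw [Ne, PySem.Chars.find_eq_neg_one_iff]
          intro hcc
          exact hcc ((List.singleton_infix_iff _ _).mpr hp)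
        obtain ⟨l, t2, hbd, hlmem, hpl⟩ := pvFindDecomp '|' body hq
        have hcond : '[' = '[' ∧ PySem.Chars.isIn [']'] ('[' :: (body ++ ']' :: tail)) = true ∧
            PySem.Chars.isIn ['|'] (PySem.List.slice ('[' :: (body ++ ']' :: tail)) none (some (PySem.Chars.find ('[' :: (body ++ ']' :: tail)) [']'] + 1))) = true := by
          refine ⟨rfl, (pvIsInSingleton _ _).mpr (by simp), ?_⟩
          rw [hseg]
          exact (pvIsInSingleton _ _).mpr (by simp [hp])
        rw [pvAGo, dif_pos hcond, dif_pos ⟨hk, (pvIsInSingleton _ _).mpr hp⟩]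
        have hpos : PySem.Chars.find ('[' :: (body ++ [']'])) ['|'] = (l.length : Int) + 1 := by
          have hsplit : '[' :: (body ++ [']']) = ('[' :: l) ++ '|' :: (t2 ++ [']']) := by
            rw [hbd]; simp
          rw [hsplit, pvFindAppend '|' ('[' :: l) (t2 ++ [']'])
            (by intro hm; rcases List.mem_cons.mp hm with h1 | h2
                · exact absurd h1 (by decide)
                · exact hlmem h2)]
          push_cast [List.length_cons]; ring
        have hlinkA : PySem.List.slice ('[' :: (body ++ [']'])) (some 1) (some ((l.length : Int) + 1)) = l := by
          rw [PySem.List.slice_toNat _ (by omega) (by positivity)]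
          have h1 : ((1:Int)).toNat = 1 := by omega
          have h2 : ((l.length : Int) + 1).toNat = l.length + 1 := by omega
          rw [h1, h2]
          show (body ++ [']']).take (l.length + 1 - 1) = l
          rw [hbd, Nat.add_sub_cancel]
          have : (l ++ '|' :: t2) ++ [']'] = l ++ ('|' :: (t2 ++ [']'])) := by simp
          rw [this, List.take_left]
        have hlinkB : PySem.List.slice body none (some (PySem.Chars.find body ['|'])) = l := by
          rw [← hpl, PySem.List.slice_to _ (by positivity), Int.toNat_natCast, hbd, List.take_left]
        have htextA : PySem.List.slice ('[' :: (body ++ [']'])) (some ((l.length : Int) + 1 + 1)) (some (-1)) = t2 := by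
          have hc : ((l.length : Int) + 1 + 1) = ((l.length + 2 : Nat) : Int) := by push_cast; ring
          rw [hc, pvSliceNegOne]
          have hdrop : ('[' :: (body ++ [']'])).drop (l.length + 2) = t2 ++ [']'] := by
            rw [hbd]
            show (('[' :: (l ++ '|' :: t2)) ++ [']']).drop (l.length + 2) = t2 ++ [']']
            have : ('[' :: (l ++ '|' :: t2)) ++ [']'] = ('[' :: l) ++ '|' :: (t2 ++ [']']) := by simp
            rw [this]
            have h2 : l.length + 2 = ('[' :: l).length + 1 := by simp
            rw [h2, pvDropApp]
          rw [hdrop, List.dropLast_concat]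
        have htextB : PySem.List.slice body (some (PySem.Chars.find body ['|'] + 1)) none = t2 := by
          rw [← hpl, PySem.List.slice_from _ (by positivity)]
          have h2 : ((l.length : Int) + 1).toNat = l.length + 1 := by omega
          rw [h2, hbd, pvDropApp]
        have hdropA : ('[' :: (body ++ ']' :: tail)).drop (('[' :: (body ++ [']'])).length) = tail := by
          have h2 : ('[' :: (body ++ [']'])).length = body.length + 2 := by simp
          rw [h2]
          show (('[' :: body) ++ ']' :: tail).drop (body.length + 2) = tail
          have h3 : body.length + 2 = ('[' :: body).length + 1 := by simp
          rw [h3, pvDropApp]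
        have hdropB : PySem.List.slice (body ++ ']' :: tail) (some (PySem.Chars.find (body ++ ']' :: tail) [']'] + 1)) none = tail := by
          rw [← hkl, PySem.List.slice_from _ (by positivity)]
          have h2 : ((body.length : Int) + 1).toNat = body.length + 1 := by omega
          rw [h2, pvDropApp]
        simp only [hseg, hpos, hlinkA, hlinkB, htextA, htextB, hdropA, hdropB]
        have htl : tail.length < n := by simp at hn; omega
        have := ih tail.length htl tail
          (acc ++ pre ++ ('[' :: t2 ++ [']', '('] ++ (if PySem.Chars.startswith l pvVK = true then l else pvVK ++ l) ++ [')'])) rfl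
        simpa [List.append_assoc] using this
      · -- '[' … ']' but no '|': both sides emit '[' and continue after it
        rw [dif_neg (fun hcc => hp ((pvIsInSingleton _ _).mp hcc.2))]
        rw [pvAGo, dif_neg (fun hcc => by
          have h3 := hcc.2.2
          rw [hseg] at h3
          have := (pvIsInSingleton _ _).mp h3
          rcases List.mem_cons.mp this with h1 | h2
          · exact absurd h1 (by decide)
          · rcases List.mem_append.mp h2 with h4 | h5
            · exact hp h4
            · exact absurd (List.mem_singleton.mp h5) (by decide))]
        have := ih _ hnlt (body ++ ']' :: tail) (acc ++ pre ++ ['[']) rfl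
        simpa [List.append_assoc] using this


-- ===== VERDICT (by name: the statement is the Claim_ definition above) =====
theorem parse_hyperlinks_spec : Claim_equal_parse_hyperlinks := by
  intro post_text _
  unfold Spec_parse_hyperlinks parse_hyperlinks parse_hyperlinks_alt
  rw [pvMain]
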